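-- pv_equiv track=rewrite | github.com/Surjune/IoT-Device-Security-Analyzer | IoT Device Security Analyzer/backend/app.py | enhanced_device_name_from_cves
-- ===== SOURCE A (Python) =====
-- def enhanced_device_name_from_cves(ip, hostname, open_ports, cves):
--     """
--     Generate a short, professional (max 2 words) device name
--     """
--
--     # Default
--     name = "IoT Device"
--
--     if cves:
--         text = " ".join(c["summary"].lower() for c in cves)
--
--         if "camera" in text or "webcam" in text:
--             name = "IP Camera"
--
--         elif "mqtt" in text or "gateway" in text:
--             name = "IoT Gateway"
--
--         elif "router" in text:
--             name = "Network Router"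
--
--         elif "embedded" in text or "firmware" in text:
--             name = "Embedded Device"
--
--         elif "web interface" in text or "http" in text:
--             name = "Web Device"
--
--     # Optional hostname hint (still 2 words max)
--     if hostname:
--         h = hostname.lower()
--         if "android" in h or "ipwebcam" in h:
--             name = "IP Camera"
--
--     return name
-- ===== SOURCE B (Python) =====
-- KEYWORD_PRIORITY = {
--     "camera": 0, "webcam": 0,
--     "mqtt": 1, "gateway": 1,
--     "router": 2,
--     "embedded": 3, "firmware": 3,
--     "web interface": 4, "http": 4,
-- }
-- LABELS = ["IP Camera", "IoT Gateway", "Network Router",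
--           "Embedded Device", "Web Device", "IoT Device"]
--
--
-- def enhanced_device_name_from_cves(ip, hostname, open_ports, cves):
--     name = "IoT Device"
--     if cves:
--         text = " ".join(c["summary"].lower() for c in cves)
--         best = min((p for kw, p in KEYWORD_PRIORITY.items() if kw in text),
--                    default=len(LABELS) - 1)
--         name = LABELS[best]
--     if hostname:
--         h = hostname.lower()
--         if "android" in h or "ipwebcam" in h:
--             name = "IP Camera"
--     return name
-- ===== Notes on version B (the rewrite author's own statement) =====
-- stated objective: alternative
-- what changed: The if-elif chain with first-match short-circuiting is replaced by an exhaustive scan over a keyword->priority map taking the minimum matched priority and indexing a label table; correct because the chain's winner is exactly the matched keyword of smallest priority.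
import Mathlib
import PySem

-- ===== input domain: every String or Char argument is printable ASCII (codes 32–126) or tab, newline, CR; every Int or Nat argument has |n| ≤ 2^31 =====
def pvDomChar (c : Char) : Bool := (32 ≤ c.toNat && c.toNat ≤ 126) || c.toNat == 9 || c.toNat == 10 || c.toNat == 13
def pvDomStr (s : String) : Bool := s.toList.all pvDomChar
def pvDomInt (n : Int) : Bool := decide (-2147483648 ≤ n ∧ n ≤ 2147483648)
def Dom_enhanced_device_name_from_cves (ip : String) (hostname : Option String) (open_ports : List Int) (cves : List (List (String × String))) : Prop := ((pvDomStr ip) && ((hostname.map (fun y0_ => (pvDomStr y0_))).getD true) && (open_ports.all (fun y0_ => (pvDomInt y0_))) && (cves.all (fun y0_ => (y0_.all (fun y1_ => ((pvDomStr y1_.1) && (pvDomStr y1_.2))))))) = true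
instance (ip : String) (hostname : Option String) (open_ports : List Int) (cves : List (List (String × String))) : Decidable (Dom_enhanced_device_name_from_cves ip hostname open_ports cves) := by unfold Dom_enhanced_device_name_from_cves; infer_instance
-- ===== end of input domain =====

-- B replaces the first-match if-elif chain by an exhaustive min-priority keyword scan over a priority map plus a label table (alternative algorithm, same cost).


-- ===== PORT A =====
-- c["summary"] is first-match lookup in the association list; .getD "" is a totality default,
-- reached only when the key is absent, i.e. outside Pre_ (Python raises KeyError there).
def pvSummaryText (cves : List (List (String × String))) : String :=
  PySem.Str.join " " (cves.map (fun c => PySem.Str.lower (((PySem.Dict.mk c).get? "summary").getD "")))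

def enhanced_device_name_from_cves (ip : String) (hostname : Option String) (open_ports : List Int) (cves : List (List (String × String))) : String :=
  let name := "IoT Device"
  let name :=
    if cves ≠ [] then
      let text := pvSummaryText cves
      if PySem.Str.isIn "camera" text || PySem.Str.isIn "webcam" text then "IP Camera"
      else if PySem.Str.isIn "mqtt" text || PySem.Str.isIn "gateway" text then "IoT Gateway"
      else if PySem.Str.isIn "router" text then "Network Router"
      else if PySem.Str.isIn "embedded" text || PySem.Str.isIn "firmware" text then "Embedded Device"
      else if PySem.Str.isIn "web interface" text || PySem.Str.isIn "http" text then "Web Device"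
      else name
    else name
  match hostname with
  | none => name
  | some hs =>
    if hs ≠ "" then      -- Python truthiness of the hostname string
      let h := PySem.Str.lower hs
      if PySem.Str.isIn "android" h || PySem.Str.isIn "ipwebcam" h then "IP Camera" else name
    else name

-- ===== PORT B =====
def pvKeywordPriority : List (String × Int) :=
  [ ("camera", 0), ("webcam", 0)
  , ("mqtt", 1), ("gateway", 1)
  , ("router", 2)
  , ("embedded", 3), ("firmware", 3)
  , ("web interface", 4), ("http", 4) ]

def pvLabels : List String :=
  ["IP Camera", "IoT Gateway", "Network Router", "Embedded Device", "Web Device", "IoT Device"]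

-- min((p for kw, p in KEYWORD_PRIORITY.items() if kw in text), default=len(LABELS)-1)
def pvBest (text : String) : Int :=
  pvKeywordPriority.foldl
    (fun acc kp => if PySem.Str.isIn kp.1 text then min acc kp.2 else acc)
    ((pvLabels.length : Int) - 1)

def enhanced_device_name_from_cves_alt (ip : String) (hostname : Option String) (open_ports : List Int) (cves : List (List (String × String))) : String :=
  let name :=
    if cves ≠ [] then
      -- LABELS[best]: best is always in [0,5], so the pyGet? default is never reached
      (PySem.List.pyGet? pvLabels (pvBest (pvSummaryText cves))).getD "IoT Device"
    else "IoT Device"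
  match hostname with
  | none => name
  | some hs =>
    if hs ≠ "" then
      let h := PySem.Str.lower hs
      if PySem.Str.isIn "android" h || PySem.Str.isIn "ipwebcam" h then "IP Camera" else name
    else name

-- ===== PRECONDITION & SPEC =====
-- Pre_ excludes exactly the inputs where Python A raises KeyError: a non-empty cves containing a dict without a "summary" key.
def Pre_enhanced_device_name_from_cves (ip : String) (hostname : Option String) (open_ports : List Int) (cves : List (List (String × String))) : Prop :=
  ∀ c ∈ cves, ((PySem.Dict.mk c).get? "summary").isSome
instance (ip : String) (hostname : Option String) (open_ports : List Int) (cves : List (List (String × String))) : Decidable (Pre_enhanced_device_name_from_cves ip hostname open_ports cves) := by unfold Pre_enhanced_device_name_from_cves; infer_instance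

def pvWitness_enhanced_device_name_from_cves : String × Option String × List Int × (List (List (String × String))) :=
  ("10.0.0.2", some "cam-host", [80], [[("summary", "Buffer overflow in WebCam firmware")]])

def Spec_enhanced_device_name_from_cves (ip : String) (hostname : Option String) (open_ports : List Int) (cves : List (List (String × String))) (out : String) : Prop := out = enhanced_device_name_from_cves_alt ip hostname open_ports cves
instance (ip : String) (hostname : Option String) (open_ports : List Int) (cves : List (List (String × String))) (out : String) : Decidable (Spec_enhanced_device_name_from_cves ip hostname open_ports cves out) := by unfold Spec_enhanced_device_name_from_cves; infer_instance

-- ===== CLAIM (what is proved, stated in full; the proofs are below) =====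
def Claim_equal_enhanced_device_name_from_cves : Prop := ∀ (ip : String) (hostname : Option String) (open_ports : List Int) (cves : List (List (String × String))), Dom_enhanced_device_name_from_cves ip hostname open_ports cves → Pre_enhanced_device_name_from_cves ip hostname open_ports cves → Spec_enhanced_device_name_from_cves ip hostname open_ports cves (enhanced_device_name_from_cves ip hostname open_ports cves)

-- ===== LEMMAS AND PROOFS =====
-- B's min-priority scan, reduced on the literal keyword table, equals A's if-elif chain.
theorem pvBest_labels (text : String) :
    (PySem.List.pyGet? pvLabels (pvBest text)).getD "IoT Device" =
      (if PySem.Str.isIn "camera" text || PySem.Str.isIn "webcam" text then "IP Camera"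
       else if PySem.Str.isIn "mqtt" text || PySem.Str.isIn "gateway" text then "IoT Gateway"
       else if PySem.Str.isIn "router" text then "Network Router"
       else if PySem.Str.isIn "embedded" text || PySem.Str.isIn "firmware" text then "Embedded Device"
       else if PySem.Str.isIn "web interface" text || PySem.Str.isIn "http" text then "Web Device"
       else "IoT Device") := by
  simp only [pvBest, pvKeywordPriority, pvLabels, List.foldl]
  generalize PySem.Str.isIn "camera" text = b1
  generalize PySem.Str.isIn "webcam" text = b2
  generalize PySem.Str.isIn "mqtt" text = b3
  generalize PySem.Str.isIn "gateway" text = b4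
  generalize PySem.Str.isIn "router" text = b5
  generalize PySem.Str.isIn "embedded" text = b6
  generalize PySem.Str.isIn "firmware" text = b7
  generalize PySem.Str.isIn "web interface" text = b8
  generalize PySem.Str.isIn "http" text = b9
  revert b1 b2 b3 b4 b5 b6 b7 b8 b9
  decide

-- ===== VERDICT (by name: the statement is the Claim_ definition above) =====
theorem enhanced_device_name_from_cves_spec : Claim_equal_enhanced_device_name_from_cves := by
  intro ip hostname open_ports cves _ _
  unfold Spec_enhanced_device_name_from_cves
  unfold enhanced_device_name_from_cves enhanced_device_name_from_cves_alt
  rw [pvBest_labels]
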